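-- pv_equiv track=rewrite | github.com/anton31kah/AdventOfCode | src/year2022/day08/part1.py | find_from_top
-- ===== SOURCE A (Python) =====
-- def find_from_top(grid):
--     from_top = []
--
--     from_top_max = grid[0][:]
--     for row in grid:
--         from_top_row = []
--         for idx, cell in enumerate(row):
--             from_top_max[idx] = max(from_top_max[idx], cell)
--             from_top_row.append(from_top_max[idx])
--         from_top.append(from_top_row)
--
--     return from_top
-- ===== SOURCE B (Python) =====
-- def find_from_top(grid):
--     # Column-major: one whole column at a time with a scalar running max,
--     # writing into a preallocated output of the same shape as grid.
--     width = len(grid[0])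
--     out = [[0] * len(row) for row in grid]
--     for j in range(width):
--         m = grid[0][j]
--         for i, row in enumerate(grid):
--             if j < len(row):
--                 m = max(m, row[j])
--                 out[i][j] = m
--     return out
-- ===== Notes on version B (the rewrite author's own statement) =====
-- stated objective: alternative
-- what changed: B traverses the grid column-major: for each column index it sweeps the rows once with a scalar running maximum and writes into a preallocated same-shape output, instead of A's row-major sweep that mutates a per-column max array while building each row cell by cell.
import Mathlib
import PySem

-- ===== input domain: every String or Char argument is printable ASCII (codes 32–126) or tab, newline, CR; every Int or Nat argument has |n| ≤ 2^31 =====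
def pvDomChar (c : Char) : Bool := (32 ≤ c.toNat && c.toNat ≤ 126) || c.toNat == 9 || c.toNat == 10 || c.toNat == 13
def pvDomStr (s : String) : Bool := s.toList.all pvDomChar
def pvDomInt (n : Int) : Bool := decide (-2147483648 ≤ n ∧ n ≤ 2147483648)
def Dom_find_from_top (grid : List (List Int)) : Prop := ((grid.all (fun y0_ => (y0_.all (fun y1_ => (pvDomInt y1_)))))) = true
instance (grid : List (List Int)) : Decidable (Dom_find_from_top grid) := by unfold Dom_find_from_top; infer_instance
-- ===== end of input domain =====

-- B re-implements the column-wise running maximum column-major (one scalar running max per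
-- column, written into a preallocated same-shape output) instead of A's row-major sweep; an
-- alternative decomposition of the same cost, proved equal on all grids on which A returns.


-- ===== PORT A =====
-- inner loop body: 'for idx, cell in enumerate(row): from_top_max[idx] = max(...); from_top_row.append(...)'
-- state (from_top_max, from_top_row, idx); from_top_max[idx] read via getD and written via set
-- (exact while idx is in range, which Pre_ guarantees; out of range Python raises IndexError).
def stepCellA (acc : List Int × List Int × Nat) (cell : Int) : List Int × List Int × Nat :=
  let m := max (acc.1.getD acc.2.2 0) cell
  (acc.1.set acc.2.2 m, acc.2.1 ++ [m], acc.2.2 + 1)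

-- outer loop body: 'for row in grid: … from_top.append(from_top_row)'
def stepRowA (st : List Int × List (List Int)) (row : List Int) : List Int × List (List Int) :=
  let inner := row.foldl stepCellA (st.1, [], 0)
  (inner.1, st.2 ++ [inner.2.1])

def find_from_top (grid : List (List Int)) : List (List Int) :=
  match grid with
  | [] => []   -- 'grid[0]' raises IndexError here; excluded by Pre_
  | r0 :: _ => (grid.foldl stepRowA (r0, [])).2

-- ===== PORT B =====
-- inner loop body: 'for i, row in enumerate(grid): if j < len(row): m = max(m, row[j]); out[i][j] = m'
-- state (m, i, out); out[i][j] = m is out.modify i (set j m) (exact while i, j in range, as under Pre_).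
def stepRowB (j : Nat) (acc : Int × Nat × List (List Int)) (row : List Int) : Int × Nat × List (List Int) :=
  if j < row.length then
    let m := max acc.1 (row.getD j 0)
    (m, acc.2.1 + 1, acc.2.2.modify acc.2.1 (fun r => r.set j m))
  else (acc.1, acc.2.1 + 1, acc.2.2)

-- one pass of the outer loop 'for j in range(width)', with 'm = grid[0][j]' as the seed
def passB (grid : List (List Int)) (r0 : List Int) (out : List (List Int)) (j : Nat) : List (List Int) :=
  (grid.foldl (stepRowB j) (r0.getD j 0, 0, out)).2.2

def find_from_top_alt (grid : List (List Int)) : List (List Int) :=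
  match grid with
  | [] => []   -- 'grid[0]' raises IndexError here; excluded by Pre_
  | r0 :: _ =>
    (List.range r0.length).foldl (passB grid r0)
      (grid.map (fun row => List.replicate row.length (0 : Int)))

-- ===== PRECONDITION & SPEC =====
-- Pre_ is exactly A's return domain: A raises IndexError on the empty grid ('grid[0]') and on
-- any grid with a row longer than the first row ('from_top_max[idx]' out of range).
def Pre_find_from_top (grid : List (List Int)) : Prop :=
  grid ≠ [] ∧ ∀ row ∈ grid, row.length ≤ (grid.headD []).length
instance (grid : List (List Int)) : Decidable (Pre_find_from_top grid) := by
  unfold Pre_find_from_top; infer_instance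

def pvWitness_find_from_top : List (List Int) := [[3, 1, 4], [1, 5, 2], [2, 0, 6]]

def Spec_find_from_top (grid : List (List Int)) (out : List (List Int)) : Prop := out = find_from_top_alt grid
instance (grid : List (List Int)) (out : List (List Int)) : Decidable (Spec_find_from_top grid out) := by unfold Spec_find_from_top; infer_instance

-- ===== CLAIM (what is proved, stated in full; the proofs are below) =====
def Claim_equal_find_from_top : Prop := ∀ (grid : List (List Int)), Dom_find_from_top grid → Pre_find_from_top grid → Spec_find_from_top grid (find_from_top grid)

-- ===== LEMMAS AND PROOFS =====

-- the column-j values of the rows that have a j-th cell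
def cvals (rows : List (List Int)) (j : Nat) : List Int := rows.filterMap (fun row => row[j]?)

-- the common pointwise target: entry (i, j) of the result on grid r0 :: _ with seeds from r0
def tgt (rows : List (List Int)) (seed : List Int) (i j : Nat) : Int :=
  (cvals (rows.take (i + 1)) j).foldl max (seed.getD j 0)

-- list-surgery helpers
theorem append_cons_set (l : List Int) (x v : Int) (r : List Int) :
    (l ++ x :: r).set l.length v = l ++ v :: r := by
  induction l with
  | nil => rfl
  | cons a l ih => simp [ih]

theorem append_cons_modify (l : List (List Int)) (x : List Int) (f : List Int → List Int)
    (r : List (List Int)) :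
    (l ++ x :: r).modify l.length f = l ++ f x :: r := by
  induction l with
  | nil => rfl
  | cons a l ih => simp [List.modify_succ_cons, ih]

theorem append_cons_getD (l : List Int) (x : Int) (r : List Int) (d : Int) :
    (l ++ x :: r).getD l.length d = x := by
  induction l with
  | nil => rfl
  | cons a l ih => simpa using ih

-- A's inner loop, done/pending split of from_top_max
theorem innerA (cells : List Int) (donem pend frow : List Int)
    (h : cells.length ≤ pend.length) :
    cells.foldl stepCellA (donem ++ pend, frow, donem.length)
      = (donem ++ pend.zipWith max cells ++ pend.drop cells.length,
         frow ++ pend.zipWith max cells, donem.length + cells.length) := by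
  induction cells generalizing donem pend frow with
  | nil => simp
  | cons c cs ih =>
    match pend with
    | [] => simp at h
    | p :: ps =>
      have h' : cs.length ≤ ps.length := by simpa using h
      have := ih (donem ++ [max p c]) ps (frow ++ [max p c]) h'
      simp only [List.foldl_cons, stepCellA, append_cons_getD, append_cons_set]
      simp only [List.append_assoc, List.singleton_append, List.length_append,
        List.length_cons, List.length_nil] at this ⊢
      rw [show donem.length + 1 = donem.length + 1 from rfl] at this
      simpa [List.zipWith, Nat.add_assoc, Nat.add_comm 1 cs.length] using this

-- getD through map-over-range
theorem mapRange_getD {α : Type} (n t : Nat) (f : Nat → α) (d : α) :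
    ((List.range n).map f).getD t d = if t < n then f t else d := by
  rcases Nat.lt_or_ge t n with h | h
  · rw [List.getD_eq_getElem _ _ (by simpa using h)]
    simp [h]
  · rw [List.getD_eq_default _ _ (by simpa using h)]
    simp [Nat.not_lt.mpr h]

theorem cvals_cons (r : List Int) (rs : List (List Int)) (j : Nat) :
    cvals (r :: rs) j = if j < r.length then r.getD j 0 :: cvals rs j else cvals rs j := by
  by_cases h : j < r.length
  · simp [cvals, h]
  · have hn : r[j]? = none := by rw [List.getElem?_eq_none_iff]; omega
    simp [cvals, h]

theorem getD_bump (ftm r : List Int) (h : r.length ≤ ftm.length) (j : Nat) :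
    (ftm.zipWith max r ++ ftm.drop r.length).getD j 0
      = if j < r.length then max (ftm.getD j 0) (r.getD j 0) else ftm.getD j 0 := by
  have hz : (ftm.zipWith max r).length = r.length := by simp [List.length_zipWith]; omega
  by_cases hj : j < r.length
  · rw [List.getD_append _ _ _ _ (by omega)]
    rw [List.getD_eq_getElem _ _ (by omega), List.getElem_zipWith]
    rw [List.getD_eq_getElem _ _ (by omega), List.getD_eq_getElem _ _ hj]
    simp [hj]
  · simp only [hj, if_false]
    rw [List.getD_append_right _ _ _ _ (by omega)]
    rcases Nat.lt_or_ge j ftm.length with hlt | hge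
    · rw [List.getD_eq_getElem _ _ (by simp [hz]; omega), List.getElem_drop,
        List.getD_eq_getElem _ _ hlt]
      congr 1; omega
    · rw [List.getD_eq_default _ _ (by simp [hz]; omega), List.getD_eq_default _ _ hge]

theorem tgt_zero (r : List Int) (rs : List (List Int)) (ftm : List Int) (j : Nat)
    (hj : j < r.length) :
    tgt (r :: rs) ftm 0 j = max (ftm.getD j 0) (r.getD j 0) := by
  simp [tgt, hj, cvals]

theorem tgt_succ (r : List Int) (rs : List (List Int)) (ftm : List Int) (i j : Nat)
    (h : r.length ≤ ftm.length) :
    tgt (r :: rs) ftm (i + 1) j = tgt rs (ftm.zipWith max r ++ ftm.drop r.length) i j := by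
  simp only [tgt, List.take_succ_cons, cvals_cons, getD_bump ftm r h]
  by_cases hj : j < r.length <;> simp [hj]

-- A's outer loop, pointwise characterisation
theorem outerA (rows : List (List Int)) (ftm : List Int) (out : List (List Int))
    (h : ∀ r ∈ rows, r.length ≤ ftm.length) :
    (rows.foldl stepRowA (ftm, out)).2
      = out ++ (List.range rows.length).map (fun i =>
          (List.range ((rows.getD i []).length)).map (fun j => tgt rows ftm i j)) := by
  induction rows generalizing ftm out with
  | nil => simp
  | cons r rs ih =>
    have hr : r.length ≤ ftm.length := h r (by simp)
    have hz : (ftm.zipWith max r).length = r.length := by simp [List.length_zipWith]; omega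
    have hstep : stepRowA (ftm, out) r
        = (ftm.zipWith max r ++ ftm.drop r.length, out ++ [ftm.zipWith max r]) := by
      have := innerA r [] ftm [] hr
      simp only [List.nil_append, List.length_nil] at this
      simp [stepRowA, this]
    have hlen' : (ftm.zipWith max r ++ ftm.drop r.length).length = ftm.length := by
      simp [hz]; omega
    have h' : ∀ r' ∈ rs, r'.length ≤ (ftm.zipWith max r ++ ftm.drop r.length).length := by
      intro r' hr'; rw [hlen']; exact h r' (by simp [hr'])
    rw [List.foldl_cons, hstep, ih _ _ h']
    simp only [List.length_cons, List.range_succ_eq_map, List.map_cons, List.map_map,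
      List.getD_cons_zero, List.append_assoc, List.singleton_append]
    congr 1
    congr 1
    · -- head row
      apply List.ext_getElem (by simp [hz])
      intro q h1 h2
      simp only [List.getElem_map, List.getElem_range, List.getElem_zipWith]
      have hq : q < r.length := by simpa [hz] using h1
      rw [tgt_zero r rs ftm q hq, List.getD_eq_getElem _ _ (by omega),
        List.getD_eq_getElem _ _ hq]
    · -- tail rows
      apply List.map_congr_left
      intro i _
      simp only [Function.comp]
      apply List.map_congr_left
      intro j _
      exact (tgt_succ r rs ftm i j hr).symm

-- B's inner loop (one column pass), done/pending split of out
theorem innerB (rows outs done : List (List Int)) (j : Nat) (m : Int)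
    (hlen : outs.length = rows.length)
    (hshape : ∀ t, (outs.getD t []).length = (rows.getD t []).length) :
    (rows.foldl (stepRowB j) (m, done.length, done ++ outs)).2.2
      = done ++ (List.range rows.length).map (fun t =>
          if j < (rows.getD t []).length then
            (outs.getD t []).set j ((cvals (rows.take (t + 1)) j).foldl max m)
          else outs.getD t []) := by
  induction rows generalizing outs done m with
  | nil => simp at hlen; simp [hlen]
  | cons r rs ih =>
    match outs with
    | [] => simp at hlen
    | o :: os =>
      have hlen' : os.length = rs.length := by simpa using hlen
      have hshape' : ∀ t, (os.getD t []).length = (rs.getD t []).length := by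
        intro t; exact hshape (t + 1)
      have ho : o.length = r.length := by simpa using hshape 0
      by_cases hj : j < r.length
      · have hstep : stepRowB j (m, done.length, done ++ o :: os) r
            = (max m (r.getD j 0), done.length + 1,
               done ++ o.set j (max m (r.getD j 0)) :: os) := by
          simp [stepRowB, hj, append_cons_modify]
        rw [List.foldl_cons, hstep,
          show done.length + 1 = (done ++ [o.set j (max m (r.getD j 0))]).length by simp,
          show done ++ o.set j (max m (r.getD j 0)) :: os
              = (done ++ [o.set j (max m (r.getD j 0))]) ++ os by simp,
          ih os _ _ hlen' hshape']
        simp only [List.length_cons, List.range_succ_eq_map, List.map_cons, List.map_map,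
          List.getD_cons_zero, List.append_assoc, List.singleton_append]
        congr 1
        congr 1
        · simp [hj, cvals]
        · apply List.map_congr_left
          intro t _
          simp only [Function.comp, List.getD_cons_succ, List.take_succ_cons, cvals_cons, hj,
            if_true, List.foldl_cons]
      · have hstep : stepRowB j (m, done.length, done ++ o :: os) r
            = (m, done.length + 1, done ++ o :: os) := by
          simp [stepRowB, hj]
        rw [List.foldl_cons, hstep,
          show done.length + 1 = (done ++ [o]).length by simp,
          show done ++ o :: os = (done ++ [o]) ++ os by simp,
          ih os _ _ hlen' hshape']
        simp only [List.length_cons, List.range_succ_eq_map, List.map_cons, List.map_map,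
          List.getD_cons_zero, List.append_assoc, List.singleton_append]
        congr 1
        congr 1
        · simp [hj]
        · apply List.map_congr_left
          intro t _
          simp only [Function.comp, List.getD_cons_succ, List.take_succ_cons, cvals_cons, hj,
            if_false]

-- B's outer loop: after the first k column passes
theorem outerB (rows : List (List Int)) (r0 : List Int) (k : Nat) :
    (List.range k).foldl (passB rows r0) (rows.map (fun row => List.replicate row.length (0 : Int)))
      = (List.range rows.length).map (fun i =>
          (List.range ((rows.getD i []).length)).map (fun q =>
            if q < k then tgt rows r0 i q else 0)) := by
  induction k with
  | zero =>
    simp only [List.range_zero, List.foldl_nil]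
    apply List.ext_getElem (by simp)
    intro i h1 h2
    simp only [List.getElem_map, List.getElem_range]
    rw [List.getD_eq_getElem _ _ (by simpa using h1)]
    apply List.ext_getElem (by simp)
    intro q hq1 hq2
    simp [List.getElem_replicate]
  | succ k ihk =>
    rw [List.range_succ, List.foldl_append, List.foldl_cons, List.foldl_nil, ihk]
    have hlen : ((List.range rows.length).map (fun i =>
        (List.range ((rows.getD i []).length)).map (fun q =>
          if q < k then tgt rows r0 i q else 0))).length = rows.length := by simp
    have hshape : ∀ t, (((List.range rows.length).map (fun i =>
        (List.range ((rows.getD i []).length)).map (fun q =>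
          if q < k then tgt rows r0 i q else 0))).getD t []).length
          = ((rows.getD t []).length) := by
      intro t
      rw [mapRange_getD]
      by_cases ht : t < rows.length
      · simp [ht]
      · rw [List.getD_eq_default rows _ (Nat.le_of_not_lt ht)]
        simp [ht]
    have h0 := innerB rows ((List.range rows.length).map (fun i =>
        (List.range ((rows.getD i []).length)).map (fun q =>
          if q < k then tgt rows r0 i q else 0))) [] k (r0.getD k 0) hlen hshape
    simp only [List.length_nil, List.nil_append] at h0
    unfold passB
    rw [h0]
    apply List.map_congr_left
    intro t htmem
    have ht : t < rows.length := by simpa using htmem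
    rw [mapRange_getD, if_pos ht]
    by_cases hk : k < (rows.getD t []).length
    · rw [if_pos hk]
      apply List.ext_getElem (by simp)
      intro q h1 h2
      have hq : q < (rows.getD t []).length := by simpa using h1
      rw [List.getElem_set]
      by_cases hqk : k = q
      · subst hqk; simp [tgt]
      · simp only [hqk, if_false, List.getElem_map, List.getElem_range]
        split_ifs <;> first | rfl | omega
    · rw [if_neg hk]
      apply List.map_congr_left
      intro q hqmem
      have hq : q < (rows.getD t []).length := by simpa using hqmem
      have h1 : q < k := by omega
      have h2 : q < k + 1 := by omega
      simp [h1, h2]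

-- ===== VERDICT (by name: the statement is the Claim_ definition above) =====
theorem find_from_top_spec : Claim_equal_find_from_top := by
  intro grid _ hpre
  obtain ⟨hne, hrows⟩ := hpre
  unfold Spec_find_from_top
  match grid, hne with
  | r0 :: rest, _ =>
    have hr : ∀ r ∈ r0 :: rest, r.length ≤ r0.length := by simpa using hrows
    show (( r0 :: rest).foldl stepRowA (r0, [])).2
        = (List.range r0.length).foldl (passB (r0 :: rest) r0)
            ((r0 :: rest).map (fun row => List.replicate row.length (0 : Int)))
    rw [outerA (r0 :: rest) r0 [] hr, outerB (r0 :: rest) r0 r0.length, List.nil_append]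
    apply List.map_congr_left
    intro i himem
    have hi : i < (r0 :: rest).length := by simpa using himem
    apply List.map_congr_left
    intro q hqmem
    have hq : q < ((r0 :: rest).getD i []).length := by simpa using hqmem
    have hmem : (r0 :: rest).getD i [] ∈ r0 :: rest := by
      rw [List.getD_eq_getElem _ _ hi]; exact List.getElem_mem hi
    have : q < r0.length := lt_of_lt_of_le hq (hr _ hmem)
    simp [this]
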